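-- pv_equiv track=rewrite | github.com/jbutler/lenderbot | investor/LoanHistory.py | _countByAge
-- ===== SOURCE A (Python) =====
-- def _countByAge(loans, months):
--    # Loans that lived longer than our last bucket
--    count = {-1 : 0}
--    count[-1] += sum( [len(loans) for iAge,loans in loans.items() if iAge >= months[-1]] )
--
--    prev_m = 0
--    for m in months:
--       count[m] = 0
--
--       # Count the loans that lived between (prev_m -> m) months
--       count[m] += sum( [len(loans) for iAge,loans in loans.items() if iAge < m and iAge >= prev_m] )
--       prev_m = m
--
--    return count
-- ===== SOURCE B (Python) =====
-- def _countByAge(loans, months):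
--    # Offline cumulative-count sweep: sort the ages once, sort the distinct
--    # boundary values once, compute G(q) = #loans with age < q for every boundary
--    # in ONE merge pass, then each bucket is a difference of two cumulatives.
--    last = months[-1]
--    ages = sorted(((iAge, len(ls)) for iAge, ls in loans.items()), key=lambda t: t[0])
--    queries = sorted(set(months) | {0, last})
--    G = {}
--    acc = 0
--    i = 0
--    for q in queries:
--       while i < len(ages) and ages[i][0] < q:
--          acc += ages[i][1]
--          i += 1
--       G[q] = acc
--    total = sum(len(ls) for ls in loans.values())
--    count = {-1: total - G[last]}
--    prev = 0
--    for m in months: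
--       count[m] = max(0, G[m] - G[prev])
--       prev = m
--    return count
-- ===== Notes on version B (the rewrite author's own statement) =====
-- stated objective: faster
-- what changed: Replaces A's per-month rescan of all loans by an offline cumulative-count sweep: sort the (age, count) pairs once, sort the distinct month boundaries once, compute the cumulative count G(q) of loans younger than each boundary in a single merge pass, then every bucket is max(0, G(m)-G(prev)) and the tail is total-G(last); Pre_ excludes empty months, where A raises IndexError unless loans is also empty (then A returns {-1: 0}) while B always evaluates months[-1] first and raises.
-- outside the precondition, e.g. on _countByAge({}, []): A returns {-1: 0}, B raises IndexError
import Mathlib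
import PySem

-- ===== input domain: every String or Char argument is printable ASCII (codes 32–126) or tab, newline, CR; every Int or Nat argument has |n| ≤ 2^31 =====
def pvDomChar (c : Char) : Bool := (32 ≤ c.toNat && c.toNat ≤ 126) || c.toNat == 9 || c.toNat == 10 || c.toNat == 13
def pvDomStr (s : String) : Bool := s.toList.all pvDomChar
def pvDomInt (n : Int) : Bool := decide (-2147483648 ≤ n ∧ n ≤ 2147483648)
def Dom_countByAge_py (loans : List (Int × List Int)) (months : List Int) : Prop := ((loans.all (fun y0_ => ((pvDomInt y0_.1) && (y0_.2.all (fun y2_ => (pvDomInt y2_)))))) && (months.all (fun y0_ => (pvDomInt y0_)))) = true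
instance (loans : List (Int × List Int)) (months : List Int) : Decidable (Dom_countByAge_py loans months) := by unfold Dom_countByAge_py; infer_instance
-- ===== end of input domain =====

-- B replaces A's per-month rescan of all loans by an offline cumulative-count sweep:
-- sort the ages once, sort the distinct boundary values once, compute the cumulative
-- count G(q) for all boundaries in one merge pass, then each bucket is a difference
-- of two cumulatives (objective: faster algorithm, O((L+M) log(L+M)) vs O(L·M)).

-- ===== PORT A =====
def countByAge_py (loans : List (Int × List Int)) (months : List Int) : List (Int × Int) :=
  match PySem.List.pyGet? months (-1) with
  | none =>
    -- months = []: the comprehension evaluates months[-1] only if loans has items;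
    -- with loans = [] Python returns {-1: 0} (the months loop runs zero times), else it raises IndexError (outside Pre_)
    if loans.isEmpty then [(-1, 0)] else []
  | some last =>
    -- count = {-1 : 0}; count[-1] += sum([len(ls) for iAge,ls in loans.items() if iAge >= months[-1]])
    let count0 : PySem.Dict Int Int := PySem.Dict.ofList [(-1, 0)]
    let count1 := count0.modify (-1) 0 (fun v =>
      v + ((loans.filter (fun q => decide (last ≤ q.1))).map (fun q => (q.2.length : Int))).sum)
    -- prev_m = 0; for m in months: count[m] = 0; count[m] += sum(...); prev_m = m
    let res := months.foldl (fun (st : PySem.Dict Int Int × Int) m =>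
      ((st.1.insert m 0).modify m 0 (fun v =>
        v + ((loans.filter (fun q => decide (q.1 < m ∧ st.2 ≤ q.1))).map (fun q => (q.2.length : Int))).sum),
       m)) (count1, 0)
    res.1.items

-- ===== PORT B =====
-- the 'while i < len(ages) and ages[i][0] < q: acc += ages[i][1]; i += 1' loop,
-- ported as structural recursion on the remaining suffix of ages (exact: the index
-- i only ever moves forward, so the suffix is the whole visible state)
def pvAdvance : List (Int × Int) → Int → Int → Int × List (Int × Int)
  | [], acc, _ => (acc, [])
  | p :: rest, acc, q => if p.1 < q then pvAdvance rest (acc + p.2) q else (acc, p :: rest)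

def countByAge_py_alt (loans : List (Int × List Int)) (months : List Int) : List (Int × Int) :=
  match PySem.List.pyGet? months (-1) with
  | none => []   -- last = months[-1] raises IndexError: outside Pre_
  | some last =>
    -- ages = sorted(((iAge, len(ls)) for iAge, ls in loans.items()), key=lambda t: t[0])
    let ages := PySem.List.sorted (loans.map (fun q => (q.1, (q.2.length : Int)))) (fun t => t.1) false
    -- queries = sorted(set(months) | {0, last})
    let queries := PySem.List.sorted (PySem.Set.ofList (months ++ [0, last])) (fun x => x) false
    -- G = {}; acc = 0; i = 0; for q in queries: while …: …; G[q] = acc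
    let st := queries.foldl (fun (st : PySem.Dict Int Int × Int × List (Int × Int)) q =>
      let av := pvAdvance st.2.2 st.2.1 q
      (st.1.insert q av.1, av.1, av.2)) (PySem.Dict.empty, 0, ages)
    let G := st.1
    -- total = sum(len(ls) for ls in loans.values())
    let total : Int := (loans.map (fun q => (q.2.length : Int))).sum
    -- count = {-1: total - G[last]}  (last is always a key of G: exact, no KeyError)
    let count0 : PySem.Dict Int Int := PySem.Dict.ofList [(-1, total - G.getD last 0)]
    -- prev = 0; for m in months: count[m] = max(0, G[m] - G[prev]); prev = m   (m, prev always keys of G)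
    let res := months.foldl (fun (st : PySem.Dict Int Int × Int) m =>
      (st.1.insert m (max 0 (G.getD m 0 - G.getD st.2 0)), m)) (count0, 0)
    res.1.items

-- ===== PRECONDITION & SPEC =====
-- Pre_ excludes empty months: there A raises IndexError unless loans is also empty (the comprehension
-- never evaluates months[-1] then, so A returns {-1: 0}), while B evaluates months[-1] first and raises.
def Pre_countByAge_py (_loans : List (Int × List Int)) (months : List Int) : Prop := months ≠ []
instance (loans : List (Int × List Int)) (months : List Int) : Decidable (Pre_countByAge_py loans months) := by unfold Pre_countByAge_py; infer_instance
def pvWitness_countByAge_py : (List (Int × List Int)) × List Int := ([(2, [10, 20]), (7, [5])], [6, 12])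

def Spec_countByAge_py (loans : List (Int × List Int)) (months : List Int) (out : List (Int × Int)) : Prop := out = countByAge_py_alt loans months
instance (loans : List (Int × List Int)) (months : List Int) (out : List (Int × Int)) : Decidable (Spec_countByAge_py loans months out) := by unfold Spec_countByAge_py; infer_instance

-- ===== CLAIM (what is proved, stated in full; the proofs are below) =====
def Claim_equal_countByAge_py : Prop := ∀ (loans : List (Int × List Int)) (months : List Int), Dom_countByAge_py loans months → Pre_countByAge_py loans months → Spec_countByAge_py loans months (countByAge_py loans months)

-- ===== LEMMAS AND PROOFS =====

-- the per-bucket sum both programs compute, as A writes it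
def pvSval (loans : List (Int × List Int)) (p m : Int) : Int :=
  ((loans.filter (fun q => decide (q.1 < m ∧ p ≤ q.1))).map (fun q => (q.2.length : Int))).sum

-- the cumulative count G(x) = weighted number of loans with age < x
def pvF (loans : List (Int × List Int)) (x : Int) : Int :=
  ((loans.filter (fun q => decide (q.1 < x))).map (fun q => (q.2.length : Int))).sum

-- the common shape both ports reduce to: insert (m, sval prev m) along months
def pvCommon (loans : List (Int × List Int)) (d : PySem.Dict Int Int) :
    List Int → Int → PySem.Dict Int Int
  | [], _ => d
  | m :: ms, p => pvCommon loans (d.insert m (pvSval loans p m)) ms m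

-- weight sum of an (age, weight) list
def pvW (l : List (Int × Int)) : Int := (l.map Prod.snd).sum

theorem pv_modify_insert (d : PySem.Dict Int Int) (k v d0 : Int) (f : Int → Int) :
    (d.insert k v).modify k d0 f = d.insert k (f v) := by
  simp [PySem.Dict.modify, PySem.Dict.getD_insert_self, PySem.Dict.insert_insert_self]

-- A's months-loop is pvCommon
theorem pvA_fold (loans : List (Int × List Int)) (ms : List Int)
    (d : PySem.Dict Int Int) (p : Int) :
    (ms.foldl (fun (st : PySem.Dict Int Int × Int) m =>
      ((st.1.insert m 0).modify m 0 (fun v =>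
        v + ((loans.filter (fun q => decide (q.1 < m ∧ st.2 ≤ q.1))).map (fun q => (q.2.length : Int))).sum),
       m)) (d, p)).1 = pvCommon loans d ms p := by
  induction ms generalizing d p with
  | nil => rfl
  | cons m ms ih =>
    rw [List.foldl_cons, pv_modify_insert]
    simp only [zero_add, pvCommon, pvSval]
    exact ih _ _

-- the while loop takes exactly the prefix of ages below q
theorem pvAdvance_eq (rem : List (Int × Int)) (acc q : Int) :
    pvAdvance rem acc q
      = (acc + pvW (rem.takeWhile (fun p => decide (p.1 < q))),
         rem.dropWhile (fun p => decide (p.1 < q))) := by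
  induction rem generalizing acc with
  | nil => simp [pvAdvance, pvW]
  | cons p rest ih =>
    by_cases h : p.1 < q
    · simp [pvAdvance, h, ih, pvW, add_assoc]
    · simp [pvAdvance, h, pvW]

-- on a list sorted by age, filtering below q is taking the prefix below q
theorem pv_filter_eq_takeWhile (rem : List (Int × Int)) (q : Int)
    (hs : rem.Pairwise (fun a b => a.1 ≤ b.1)) :
    rem.filter (fun p => decide (p.1 < q)) = rem.takeWhile (fun p => decide (p.1 < q)) := by
  induction rem with
  | nil => rfl
  | cons p rest ih =>
    rcases List.pairwise_cons.mp hs with ⟨hp, hrest⟩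
    by_cases h : p.1 < q
    · simp [h, ih hrest]
    · have h1 : rest.filter (fun r => decide (r.1 < q)) = [] :=
        List.filter_eq_nil_iff.mpr (fun a ha => by
          simp only [decide_eq_true_eq, not_lt]
          exact le_trans (not_lt.mp h) (hp a ha))
      simp [h, h1]

-- the sweep over increasing queries builds the dict of cumulative counts
theorem pv_sweep (ages : List (Int × Int)) (qs : List Int) (d : PySem.Dict Int Int)
    (pref rem : List (Int × Int)) (hsplit : ages = pref ++ rem)
    (hsort : ages.Pairwise (fun a b => a.1 ≤ b.1))
    (hqs : qs.Pairwise (· ≤ ·))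
    (hpref : ∀ q ∈ qs, ∀ p ∈ pref, p.1 < q) :
    (qs.foldl (fun (st : PySem.Dict Int Int × Int × List (Int × Int)) q =>
        let av := pvAdvance st.2.2 st.2.1 q
        (st.1.insert q av.1, av.1, av.2)) (d, pvW pref, rem)).1
      = qs.foldl (fun d q => d.insert q (pvW (ages.filter (fun p => decide (p.1 < q))))) d := by
  induction qs generalizing d pref rem with
  | nil => rfl
  | cons q qs ih =>
    rcases List.pairwise_cons.mp hqs with ⟨hq, hqs'⟩
    have hrs : rem.Pairwise (fun a b => a.1 ≤ b.1) :=
      ((List.pairwise_append.mp (hsplit ▸ hsort)).2.1)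
    have hWapp : pvW pref + pvW (rem.takeWhile (fun p => decide (p.1 < q)))
        = pvW (pref ++ rem.takeWhile (fun p => decide (p.1 < q))) := by
      simp [pvW]
    have hval : pvW (ages.filter (fun p => decide (p.1 < q)))
        = pvW (pref ++ rem.takeWhile (fun p => decide (p.1 < q))) := by
      rw [hsplit, List.filter_append,
        List.filter_eq_self.mpr (fun p hp => decide_eq_true (hpref q List.mem_cons_self p hp)),
        pv_filter_eq_takeWhile rem q hrs]
    have hstep : (let av := pvAdvance ((d, pvW pref, rem) : PySem.Dict Int Int × Int × List (Int × Int)).2.2 (d, pvW pref, rem).2.1 q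
        ((d, pvW pref, rem).1.insert q av.1, av.1, av.2))
        = (d.insert q (pvW (ages.filter (fun p => decide (p.1 < q)))),
           pvW (pref ++ rem.takeWhile (fun p => decide (p.1 < q))),
           rem.dropWhile (fun p => decide (p.1 < q))) := by
      simp only [pvAdvance_eq, hWapp, hval]
    rw [List.foldl_cons, List.foldl_cons, hstep]
    refine ih _ (pref ++ rem.takeWhile (fun p => decide (p.1 < q)))
      (rem.dropWhile (fun p => decide (p.1 < q)))
      (by rw [hsplit, List.append_assoc, List.takeWhile_append_dropWhile]) hqs' ?_
    intro q' hq' r hr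
    rcases List.mem_append.mp hr with h | h
    · exact hpref q' (List.mem_cons_of_mem _ hq') r h
    · have h2 : decide (r.1 < q) = true :=
        List.mem_takeWhile_imp (p := fun p : Int × Int => decide (p.1 < q)) h
      rw [decide_eq_true_eq] at h2
      exact lt_of_lt_of_le h2 (hq q' hq')

-- getD after a fold of inserts of f q along qs
theorem pv_getD_fold (qs : List Int) (f : Int → Int) (d : PySem.Dict Int Int) (k d0 : Int) :
    (qs.foldl (fun d q => d.insert q (f q)) d).getD k d0
      = if k ∈ qs then f k else d.getD k d0 := by
  induction qs generalizing d with
  | nil => simp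
  | cons q qs ih =>
    rw [List.foldl_cons, ih]
    by_cases hk : k ∈ qs
    · simp [hk]
    · simp only [hk, if_false, List.mem_cons, PySem.Dict.getD_insert]
      by_cases h : k = q <;> simp [h]

-- splitting a filtered weighted sum by a second predicate
theorem pv_sum_split (loans : List (Int × List Int)) (P Q : Int × List Int → Prop)
    [DecidablePred P] [DecidablePred Q] :
    ((loans.filter (fun q => decide (P q))).map (fun q => (q.2.length : Int))).sum
      = ((loans.filter (fun q => decide (P q ∧ Q q))).map (fun q => (q.2.length : Int))).sum
        + ((loans.filter (fun q => decide (P q ∧ ¬ Q q))).map (fun q => (q.2.length : Int))).sum := by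
  induction loans with
  | nil => simp
  | cons x l ih =>
    by_cases hP : P x <;> by_cases hQ : Q x <;>
      simp [hP, hQ, ih] <;> ring

theorem pv_sval_nonneg (l : List (Int × List Int)) (p m : Int) : 0 ≤ pvSval l p m :=
  List.sum_nonneg (by intro x hx; rcases List.mem_map.mp hx with ⟨q, _, rfl⟩; positivity)

-- the bucket value as a difference of cumulative counts
theorem pv_max_sub (loans : List (Int × List Int)) (p m : Int) :
    max 0 (pvF loans m - pvF loans p) = pvSval loans p m := by
  rcases le_or_gt p m with hpm | hpm
  · have hsplit := pv_sum_split loans (fun q => q.1 < m) (fun q => q.1 < p)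
    have h1 : loans.filter (fun q => decide (q.1 < m ∧ q.1 < p))
        = loans.filter (fun q => decide (q.1 < p)) := by
      apply List.filter_congr; intro q _
      simp only [decide_eq_decide]
      exact ⟨fun h => h.2, fun h => ⟨lt_of_lt_of_le h hpm, h⟩⟩
    have h2 : loans.filter (fun q => decide (q.1 < m ∧ ¬ q.1 < p))
        = loans.filter (fun q => decide (q.1 < m ∧ p ≤ q.1)) := by
      apply List.filter_congr; intro q _
      simp only [not_lt]
    rw [h1, h2] at hsplit
    have hd : pvF loans m - pvF loans p = pvSval loans p m := by
      unfold pvF pvSval; omega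
    rw [hd, max_eq_right (pv_sval_nonneg loans p m)]
  · have hsplit := pv_sum_split loans (fun q => q.1 < p) (fun q => q.1 < m)
    have h1 : loans.filter (fun q => decide (q.1 < p ∧ q.1 < m))
        = loans.filter (fun q => decide (q.1 < m)) := by
      apply List.filter_congr; intro q _
      simp only [decide_eq_decide]
      exact ⟨fun h => h.2, fun h => ⟨lt_trans h hpm, h⟩⟩
    rw [h1] at hsplit
    have hz : pvSval loans p m = 0 := by
      unfold pvSval
      rw [List.filter_eq_nil_iff.mpr (fun q _ => by
        simp only [decide_eq_true_eq, not_and, not_le]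
        exact fun h => lt_trans h hpm)]
      simp
    have hge : 0 ≤ ((loans.filter (fun q => decide (q.1 < p ∧ ¬ q.1 < m))).map
        (fun q => (q.2.length : Int))).sum :=
      List.sum_nonneg (by intro x hx; rcases List.mem_map.mp hx with ⟨q, _, rfl⟩; positivity)
    rw [hz, max_eq_left]
    unfold pvF; omega

-- splitting the total weight at a boundary
theorem pv_total_split (loans : List (Int × List Int)) (x : Int) :
    (loans.map (fun q => (q.2.length : Int))).sum
      = pvF loans x + ((loans.filter (fun q => decide (x ≤ q.1))).map (fun q => (q.2.length : Int))).sum := by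
  induction loans with
  | nil => simp [pvF]
  | cons q l ih =>
    unfold pvF at ih ⊢
    rcases lt_or_ge q.1 x with h | h
    · simp [h, not_le.mpr h, ih]; ring
    · simp [h, not_lt.mpr h, ih]; ring

-- B's months-loop is pvCommon, given g agrees with pvF on every key it is asked about
theorem pvB_fold (loans : List (Int × List Int)) (g : Int → Int) (ms : List Int)
    (d : PySem.Dict Int Int) (p : Int)
    (hg : ∀ x, x = p ∨ x ∈ ms → g x = pvF loans x) :
    (ms.foldl (fun (st : PySem.Dict Int Int × Int) m =>
        (st.1.insert m (max 0 (g m - g st.2)), m)) (d, p)).1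
      = pvCommon loans d ms p := by
  induction ms generalizing d p with
  | nil => rfl
  | cons m ms ih =>
    rw [List.foldl_cons]
    simp only
    rw [hg m (Or.inr List.mem_cons_self), hg p (Or.inl rfl), pv_max_sub]
    refine ih _ _ (fun x hx => hg x ?_)
    rcases hx with h | h
    · exact Or.inr (h ▸ List.mem_cons_self)
    · exact Or.inr (List.mem_cons_of_mem _ h)

-- the weighted count over the sorted age list is pvF over the original loans
theorem pv_pvW_sorted (loans : List (Int × List Int)) (x : Int) :
    pvW ((PySem.List.sorted (loans.map (fun q => (q.1, (q.2.length : Int)))) (fun t => t.1) false).filter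
        (fun p => decide (p.1 < x)))
      = pvF loans x := by
  have hperm : (PySem.List.sorted (loans.map (fun q => (q.1, (q.2.length : Int)))) (fun t => t.1) false).Perm
      (loans.map (fun q => (q.1, (q.2.length : Int)))) := PySem.List.sorted_perm _ _ _
  unfold pvW pvF
  rw [List.Perm.sum_eq (List.Perm.map _ (List.Perm.filter _ hperm))]
  rw [List.filter_map, List.map_map]
  rfl

-- ===== VERDICT (by name: the statement is the Claim_ definition above) =====
theorem countByAge_py_spec : Claim_equal_countByAge_py := by
  intro loans months _ hpre
  unfold Spec_countByAge_py countByAge_py countByAge_py_alt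
  cases hlast : PySem.List.pyGet? months (-1) with
  | none =>
    rw [PySem.List.pyGet?_neg_one] at hlast
    exact absurd (List.getLast?_eq_none_iff.mp hlast) hpre
  | some last =>
    simp only
    -- names
    set ages := PySem.List.sorted (loans.map (fun q => (q.1, (q.2.length : Int)))) (fun t => t.1) false with hages
    set queries := PySem.List.sorted (PySem.Set.ofList (months ++ [0, last])) (fun x => x) false with hqueries
    have hsort : ages.Pairwise (fun a b => a.1 ≤ b.1) := PySem.List.sorted_pairwise _ _
    have hqsort : queries.Pairwise (· ≤ ·) := PySem.List.sorted_pairwise _ _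
    have hmemq : ∀ x, x ∈ queries ↔ (x ∈ months ∨ x = 0 ∨ x = last) := by
      intro x
      rw [hqueries, PySem.List.mem_sorted, PySem.Set.mem_ofList, List.mem_append]
      simp
    -- the sweep gives the dict of cumulative counts
    have hst : (queries.foldl (fun (st : PySem.Dict Int Int × Int × List (Int × Int)) q =>
        let av := pvAdvance st.2.2 st.2.1 q
        (st.1.insert q av.1, av.1, av.2)) (PySem.Dict.empty, 0, ages)).1
        = queries.foldl (fun d q => d.insert q (pvW (ages.filter (fun p => decide (p.1 < q))))) PySem.Dict.empty := by
      have := pv_sweep ages queries PySem.Dict.empty [] ages rfl hsort hqsort (by intro _ _ p hp; cases hp)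
      simpa [pvW] using this
    rw [hst]
    -- its lookups are pvF on every query key
    have hG : ∀ x, x ∈ queries →
        (queries.foldl (fun d q => d.insert q (pvW (ages.filter (fun p => decide (p.1 < q))))) PySem.Dict.empty).getD x 0
          = pvF loans x := by
      intro x hx
      rw [pv_getD_fold queries (fun q => pvW (ages.filter (fun p => decide (p.1 < q)))) _ x 0,
        if_pos hx, pv_pvW_sorted]
    -- both sides reduce to pvCommon on the same starting dict
    rw [pvA_fold loans months _ 0]
    rw [pvB_fold loans _ months _ 0 (fun x hx => hG x ((hmemq x).mpr (hx.elim (fun h => Or.inr (Or.inl h)) (fun h => Or.inl h))))]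
    have hcount : (PySem.Dict.ofList [((-1 : Int), (0 : Int))]).modify (-1) 0 (fun v =>
        v + ((loans.filter (fun q => decide (last ≤ q.1))).map (fun q => (q.2.length : Int))).sum)
        = PySem.Dict.ofList [((-1 : Int),
            (0 : Int) + ((loans.filter (fun q => decide (last ≤ q.1))).map (fun q => (q.2.length : Int))).sum)] := by
      apply PySem.Dict.ext
      simp [PySem.Dict.ofList, PySem.Dict.update, PySem.Dict.modify, PySem.Dict.insert,
        PySem.Dict.empty, PySem.Dict.contains, PySem.Dict.getD, PySem.Dict.get?]
    have htail : (loans.map (fun q => (q.2.length : Int))).sum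
        - (queries.foldl (fun d q => d.insert q (pvW (ages.filter (fun p => decide (p.1 < q))))) PySem.Dict.empty).getD last 0
        = 0 + ((loans.filter (fun q => decide (last ≤ q.1))).map (fun q => (q.2.length : Int))).sum := by
      rw [hG last ((hmemq last).mpr (Or.inr (Or.inr rfl)))]
      have := pv_total_split loans last
      omega
    rw [hcount, htail]
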